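-- pv_equiv track=rewrite | github.com/NoeFischer/podcast_summaries | src/preprocess_transcripts.py | balance_splits
-- ===== SOURCE A (Python) =====
-- def find_next_paragraph_start(content, index):
--     """Find the start index of the next paragraph."""
--     try:
--         return content.index("\n", index) + 1
--     except ValueError:  # If no newline is found, return the end of content
--         return len(content)
--
-- def balance_splits(content, estimated_parts):
--     """Adjust split points to balance content across parts."""
--     part_starts = [0]
--     for _ in range(estimated_parts - 1):
--         part_end = find_next_paragraph_start(
--             content, part_starts[-1] + len(content) // estimated_parts
--         )
--         part_starts.append(part_end)
--     part_starts.append(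
--         len(content)
--     )  # Ensure the last part goes to the end of the content
--     return part_starts
-- ===== SOURCE B (Python) =====
-- def balance_splits(content, estimated_parts):
--     """Adjust split points to balance content across parts."""
--     n = len(content)
--     starts = [0]
--     if estimated_parts >= 2:
--         newlines = [i for i, c in enumerate(content) if c == "\n"]
--         step = n // estimated_parts
--         j = 0
--         for _ in range(estimated_parts - 1):
--             target = starts[-1] + step
--             while j < len(newlines) and newlines[j] < target:
--                 j += 1
--             starts.append(newlines[j] + 1 if j < len(newlines) else n)
--     starts.append(n)
--     return starts
-- ===== Notes on version B (the rewrite author's own statement) =====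
-- stated objective: faster
-- what changed: B precomputes the list of all newline positions in one pass and then walks it with a single forward pointer (one while-advance per part), instead of A's repeated content.index forward scans of the string for every part.
import Mathlib
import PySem

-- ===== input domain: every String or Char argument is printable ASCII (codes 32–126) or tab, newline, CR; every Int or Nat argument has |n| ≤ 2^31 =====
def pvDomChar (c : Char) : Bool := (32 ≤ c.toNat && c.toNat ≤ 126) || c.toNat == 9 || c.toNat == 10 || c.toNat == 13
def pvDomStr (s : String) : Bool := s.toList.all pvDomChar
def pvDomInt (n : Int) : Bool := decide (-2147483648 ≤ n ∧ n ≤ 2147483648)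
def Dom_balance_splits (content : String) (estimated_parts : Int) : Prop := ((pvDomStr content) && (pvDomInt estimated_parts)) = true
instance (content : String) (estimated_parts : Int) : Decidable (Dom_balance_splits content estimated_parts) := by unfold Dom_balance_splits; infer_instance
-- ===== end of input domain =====

-- B replaces A's repeated forward string scans (content.index per part) by one precomputed
-- list of newline positions walked once with a forward pointer; objective: faster (one pass
-- over the text instead of a rescan per part).

-- ===== PORT A =====
-- content.index("\n", index): scan positions ≥ index for '\n' (exact for the nonnegative
-- indices A produces); found → position, else none (ValueError).
def pvFindNl (l : List Char) (k : Nat) : Option Nat :=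
  match l with
  | [] => none
  | c :: rest => if c = '\n' then some k else pvFindNl rest (k + 1)

def find_next_paragraph_start (cs : List Char) (index : Nat) : Int :=
  match pvFindNl (cs.drop index) index with
  | some p => (p : Int) + 1
  | none => (cs.length : Int)

def balance_splits (content : String) (estimated_parts : Int) : List Int :=
  let cs := content.toList
  let n : Int := cs.length
  let part_starts := (List.range (estimated_parts - 1).toNat).foldl
    (fun ps _ =>
      ps ++ [find_next_paragraph_start cs (ps.getLast! + PySem.Int.floordiv n estimated_parts).toNat])
    [0]
  part_starts ++ [n]

-- ===== PORT B =====
-- [i for i, c in enumerate(content) if c == "\n"]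
def pvNlPositions (cs : List Char) : List Int :=
  ((cs.zipIdx).filter (fun p => p.1 = '\n')).map (fun p => (p.2 : Int))

-- while j < len(newlines) and newlines[j] < target: j += 1
def pvAdvance (nl : List Int) (j : Nat) (target : Int) : Nat :=
  if h : j < nl.length then
    if nl[j]! < target then pvAdvance nl (j + 1) target else j
  else j
termination_by nl.length - j

def balance_splits_alt (content : String) (estimated_parts : Int) : List Int :=
  let cs := content.toList
  let n : Int := cs.length
  if estimated_parts ≥ 2 then
    let nl := pvNlPositions cs
    let step := PySem.Int.floordiv n estimated_parts
    let res := (List.range (estimated_parts - 1).toNat).foldl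
      (fun (sj : List Int × Nat) _ =>
        let target := sj.1.getLast! + step
        let j := pvAdvance nl sj.2 target
        (sj.1 ++ [if j < nl.length then nl[j]! + 1 else n], j))
      ([0], 0)
    res.1 ++ [n]
  else [0] ++ [n]

-- ===== PRECONDITION & SPEC =====
def Spec_balance_splits (content : String) (estimated_parts : Int) (out : List Int) : Prop := out = balance_splits_alt content estimated_parts
instance (content : String) (estimated_parts : Int) (out : List Int) : Decidable (Spec_balance_splits content estimated_parts out) := by unfold Spec_balance_splits; infer_instance

-- ===== CLAIM (what is proved, stated in full; the proofs are below) =====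
def Claim_equal_balance_splits : Prop := ∀ (content : String) (estimated_parts : Int), Dom_balance_splits content estimated_parts → Spec_balance_splits content estimated_parts (balance_splits content estimated_parts)

-- ===== LEMMAS AND PROOFS =====

theorem getLast!_concat (l : List Int) (x : Int) : (l ++ [x]).getLast! = x := by
  induction l with
  | nil => rfl
  | cons a t ih => simp [List.getLast!, ih]

-- specification list: newline positions of cs offset by k, as a structural recursion
def specNl (cs : List Char) (k : Nat) : List Int :=
  match cs with
  | [] => []
  | c :: rest => if c = '\n' then (k : Int) :: specNl rest (k + 1) else specNl rest (k + 1)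

theorem nl_eq_spec (cs : List Char) (k : Nat) :
    ((cs.zipIdx k).filter (fun p => p.1 = '\n')).map (fun p => (p.2 : Int)) = specNl cs k := by
  induction cs generalizing k with
  | nil => rfl
  | cons c rest ih =>
    simp only [List.zipIdx_cons, List.filter_cons, specNl]
    by_cases h : c = '\n' <;> simp [h, ih]

theorem pvNlPositions_eq (cs : List Char) : pvNlPositions cs = specNl cs 0 := by
  simpa [pvNlPositions] using nl_eq_spec cs 0

theorem specNl_mem (cs : List Char) (k : Nat) (x : Int) :
    x ∈ specNl cs k ↔ ∃ q : Nat, q < cs.length ∧ x = ((k + q : Nat) : Int) ∧ cs[q]! = '\n' := by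
  induction cs generalizing k with
  | nil => simp [specNl]
  | cons c rest ih =>
    by_cases h : c = '\n'
    · simp only [specNl, if_pos h, List.mem_cons, ih]
      constructor
      · rintro (rfl | ⟨q, hq, rfl, hc⟩)
        · exact ⟨0, by simp, by simp, by simpa [h]⟩
        · exact ⟨q + 1, by simp; omega, by push_cast; ring, by simpa using hc⟩
      · rintro ⟨q, hq, rfl, hc⟩
        cases q with
        | zero => left; simp
        | succ q' =>
          right; exact ⟨q', by simpa using hq, by push_cast; ring, by simpa using hc⟩
    · simp only [specNl, if_neg h, ih]
      constructor
      · rintro ⟨q, hq, rfl, hc⟩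
        exact ⟨q + 1, by simp; omega, by push_cast; ring, by simpa using hc⟩
      · rintro ⟨q, hq, rfl, hc⟩
        cases q with
        | zero => exact absurd (by simpa using hc) h
        | succ q' =>
          exact ⟨q', by simpa using hq, by push_cast; ring, by simpa using hc⟩

theorem specNl_lb (cs : List Char) (k : Nat) (x : Int) (hx : x ∈ specNl cs k) : (k : Int) ≤ x := by
  induction cs generalizing k with
  | nil => simp [specNl] at hx
  | cons c rest ih =>
    by_cases h : c = '\n'
    · rcases (by simpa [specNl, if_pos h] using hx : x = (k : Int) ∨ x ∈ specNl rest (k + 1)) with rfl | hx'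
      · exact le_refl _
      · have := ih (k + 1) hx'; push_cast at this ⊢; omega
    · have := ih (k + 1) (by simpa [specNl, if_neg h] using hx); push_cast at this ⊢; omega

theorem specNl_sorted (cs : List Char) (k : Nat) : (specNl cs k).Pairwise (· < ·) := by
  induction cs generalizing k with
  | nil => exact List.Pairwise.nil
  | cons c rest ih =>
    by_cases h : c = '\n'
    · simp only [specNl, if_pos h]
      refine List.Pairwise.cons (fun x hx => ?_) (ih (k + 1))
      have := specNl_lb rest (k + 1) x hx; push_cast at this ⊢; omega
    · simpa [specNl, if_neg h] using ih (k + 1)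

-- pvAdvance is the first index ≥ j whose element is ≥ target
theorem pvAdvance_spec (nl : List Int) (t : Int) (j : Nat) (hj : j ≤ nl.length) :
    j ≤ pvAdvance nl j t ∧ pvAdvance nl j t ≤ nl.length ∧
    (∀ k, j ≤ k → k < pvAdvance nl j t → nl[k]! < t) ∧
    (pvAdvance nl j t < nl.length → ¬ nl[pvAdvance nl j t]! < t) := by
  fun_induction pvAdvance nl j t with
  | case1 j h hlt ih =>
    obtain ⟨h1, h2, h3, h4⟩ := ih (by omega)
    refine ⟨by omega, h2, fun k hk1 hk2 => ?_, h4⟩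
    rcases Nat.eq_or_lt_of_le hk1 with rfl | hk1'
    · exact hlt
    · exact h3 k hk1' hk2
  | case2 j h hlt => exact ⟨le_refl _, by omega, fun k hk1 hk2 => by omega, fun _ => hlt⟩
  | case3 j h => exact ⟨le_refl _, by omega, fun k hk1 hk2 => by omega, fun h' => by omega⟩

theorem pvFindNl_none_iff (l : List Char) (k : Nat) :
    pvFindNl l k = none ↔ ∀ q, q < l.length → l[q]! ≠ '\n' := by
  induction l generalizing k with
  | nil => simp [pvFindNl]
  | cons c rest ih =>
    by_cases h : c = '\n'
    · simp only [pvFindNl, if_pos h]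
      constructor
      · intro hc; exact absurd hc (by simp)
      · intro hall; exact absurd (by simpa using hall 0 (by simp)) (by simp [h])
    · simp only [pvFindNl, if_neg h, ih]
      constructor
      · intro hall q hq
        cases q with
        | zero => simpa using h
        | succ q' => simpa using hall q' (by simpa using hq)
      · intro hall q hq
        simpa using hall (q + 1) (by simp; omega)

theorem pvFindNl_some_iff (l : List Char) (k p : Nat) :
    pvFindNl l k = some p ↔
      ∃ q, q < l.length ∧ p = k + q ∧ l[q]! = '\n' ∧ ∀ r, r < q → l[r]! ≠ '\n' := by
  induction l generalizing k with
  | nil => simp [pvFindNl]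
  | cons c rest ih =>
    by_cases h : c = '\n'
    · simp only [pvFindNl, if_pos h, Option.some_inj]
      constructor
      · rintro rfl; exact ⟨0, by simp, by simp, by simp [h], by omega⟩
      · rintro ⟨q, hq, rfl, hc, hmin⟩
        cases q with
        | zero => simp
        | succ q' => exact absurd (by simpa using hmin 0 (by omega)) (by simp [h])
    · simp only [pvFindNl, if_neg h, ih]
      constructor
      · rintro ⟨q, hq, rfl, hc, hmin⟩
        refine ⟨q + 1, by simp; omega, by omega, by simpa using hc, fun r hr => ?_⟩
        cases r with
        | zero => simpa using h
        | succ r' => simpa using hmin r' (by omega)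
      · rintro ⟨q, hq, rfl, hc, hmin⟩
        cases q with
        | zero => exact absurd (by simpa using hc) h
        | succ q' =>
          exact ⟨q', by simpa using hq, by omega, by simpa using hc,
            fun r hr => by simpa using hmin (r + 1) (by omega)⟩

-- the crux: A's scan from position i returns what B reads off the newline table at the
-- first index j' whose entry is ≥ i
theorem fnps_eq_table (cs : List Char) (i : Nat) (j' : Nat)
    (hlen : j' ≤ (specNl cs 0).length)
    (hlow : ∀ k, k < j' → (specNl cs 0)[k]! < (i : Int))
    (hge : j' < (specNl cs 0).length → ¬ (specNl cs 0)[j']! < (i : Int)) :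
    find_next_paragraph_start cs i =
      if j' < (specNl cs 0).length then (specNl cs 0)[j']! + 1 else (cs.length : Int) := by
  set nl := specNl cs 0 with hnl
  unfold find_next_paragraph_start
  cases hfind : pvFindNl (cs.drop i) i with
  | none =>
    rw [pvFindNl_none_iff] at hfind
    have hJ : ¬ j' < nl.length := by
      intro hj'
      have hmem : nl[j']! ∈ nl := by rw [getElem!_pos nl j' hj']; exact List.getElem_mem hj'
      rw [hnl, specNl_mem] at hmem
      obtain ⟨q, hq, heq, hc⟩ := hmem
      have hqi : i ≤ q := by
        have := hge hj'; rw [heq] at this; simpa using by omega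
      have hd : q - i < (cs.drop i).length := by simp [List.length_drop]; omega
      have := hfind (q - i) hd
      rw [getElem!_pos (cs.drop i) (q - i) hd, List.getElem_drop] at this
      rw [getElem!_pos cs q (by omega)] at hc
      simp only [show i + (q - i) = q from by omega] at this
      exact this hc
    simp [hJ]
  | some p =>
    rw [pvFindNl_some_iff] at hfind
    obtain ⟨q, hq, rfl, hc, hmin⟩ := hfind
    simp only [List.length_drop] at hq
    rw [getElem!_pos (cs.drop i) q (by simp [List.length_drop]; omega), List.getElem_drop] at hc
    have hmem : ((i + q : Nat) : Int) ∈ nl := by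
      rw [hnl, specNl_mem]
      refine ⟨i + q, by omega, by push_cast; ring, ?_⟩
      rw [getElem!_pos cs (i + q) (by omega)]; exact hc
    obtain ⟨idx, hidx, hval⟩ := List.mem_iff_getElem.mp hmem
    have hpw := (specNl_sorted cs 0)
    rw [← hnl, List.pairwise_iff_getElem] at hpw
    have hidxge : ¬ idx < j' := by
      intro hlt
      have := hlow idx hlt
      rw [getElem!_pos nl idx hidx, hval] at this
      push_cast at this; omega
    have hidxeq : idx = j' := by
      by_contra hne
      have hj' : j' < nl.length := by omega
      have hji : ¬ nl[j']! < (i : Int) := hge hj'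
      rw [getElem!_pos nl j' hj'] at hji
      have hlt2 : nl[j'] < nl[idx] := hpw j' idx hj' hidx (by omega)
      obtain ⟨q2, hq2, heq2, hc2⟩ := (specNl_mem cs 0 nl[j']).mp
        (by rw [← hnl]; exact List.getElem_mem hj')
      have hq2i : i ≤ q2 := by rw [heq2] at hji; simpa using by omega
      have hq2p : q2 < i + q := by rw [heq2, hval] at hlt2; push_cast at hlt2; omega
      have hd2 : q2 - i < (cs.drop i).length := by simp [List.length_drop]; omega
      have := hmin (q2 - i) (by omega)
      rw [getElem!_pos (cs.drop i) (q2 - i) hd2, List.getElem_drop] at this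
      simp only [show i + (q2 - i) = q2 from by omega] at this
      rw [getElem!_pos cs q2 (by omega)] at hc2
      exact this hc2
    subst hidxeq
    rw [if_pos hidx, getElem!_pos nl idx hidx, hval]

-- the two loops run in lockstep
theorem loop_eq (cs : List Char) (step : Int) (hstep : 0 ≤ step) (m : Nat) :
    let nl := specNl cs 0
    let P := (List.range m).foldl
      (fun ps _ => ps ++ [find_next_paragraph_start cs (ps.getLast! + step).toNat]) [0]
    let S := (List.range m).foldl
      (fun (sj : List Int × Nat) _ =>
        let target := sj.1.getLast! + step
        let j := pvAdvance nl sj.2 target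
        (sj.1 ++ [if j < nl.length then nl[j]! + 1 else (cs.length : Int)], j))
      ([0], 0)
    P = S.1 ∧ 0 ≤ P.getLast! ∧ S.2 ≤ nl.length ∧ ∀ k, k < S.2 → nl[k]! < P.getLast! := by
  dsimp only
  induction m with
  | zero =>
    refine ⟨rfl, by simp [List.getLast!], by simp, fun k hk => absurd hk (by simp)⟩
  | succ m ih =>
    obtain ⟨h1, h2, h3, h4⟩ := ih
    simp only [List.range_succ, List.foldl_append, List.foldl_cons, List.foldl_nil]
    set nl := specNl cs 0 with hnl
    set ps := (List.range m).foldl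
      (fun ps _ => ps ++ [find_next_paragraph_start cs (ps.getLast! + step).toNat]) [0] with hps
    set S := (List.range m).foldl
      (fun (sj : List Int × Nat) _ =>
        let target := sj.1.getLast! + step
        let j := pvAdvance nl sj.2 target
        (sj.1 ++ [if j < nl.length then nl[j]! + 1 else (cs.length : Int)], j))
      ([0], 0) with hS
    rw [← h1]
    set t := ps.getLast! + step with ht
    have ht0 : 0 ≤ t := by omega
    set j2 := pvAdvance nl S.2 t with hj2
    obtain ⟨a1, a2, a3, a4⟩ := pvAdvance_spec nl t S.2 h3
    have hcast : ((t.toNat : Nat) : Int) = t := Int.toNat_of_nonneg ht0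
    have hlow : ∀ k, k < j2 → nl[k]! < ((t.toNat : Nat) : Int) := by
      intro k hk
      rw [hcast]
      rcases lt_or_ge k S.2 with hks | hks
      · exact lt_of_lt_of_le (h4 k hks) (by omega)
      · exact a3 k hks hk
    have hge : j2 < nl.length → ¬ nl[j2]! < ((t.toNat : Nat) : Int) := by
      rw [hcast]; exact a4
    have hf := fnps_eq_table cs t.toNat j2 a2 hlow hge
    rw [← hnl] at hf
    refine ⟨by rw [hf], ?_, a2, ?_⟩
    · rw [getLast!_concat, hf]
      split_ifs with hlt
      · have hmem : nl[j2]! ∈ nl := by rw [getElem!_pos nl j2 hlt]; exact List.getElem_mem hlt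
        have := specNl_lb cs 0 nl[j2]! (by rw [← hnl]; exact hmem)
        omega
      · positivity
    · intro k hk
      rw [getLast!_concat, hf]
      have hklen : k < nl.length := by omega
      split_ifs with hlt
      · have hpw := specNl_sorted cs 0
        rw [← hnl, List.pairwise_iff_getElem] at hpw
        have := hpw k j2 hklen hlt hk
        rw [getElem!_pos nl k hklen, getElem!_pos nl j2 hlt]
        omega
      · obtain ⟨q, hq, heq, -⟩ := (specNl_mem cs 0 nl[k]!).mp
          (by rw [← hnl, getElem!_pos nl k hklen]; exact List.getElem_mem hklen)
        rw [heq]; push_cast; omega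

-- ===== VERDICT (by name: the statement is the Claim_ definition above) =====
theorem balance_splits_spec : Claim_equal_balance_splits := by
  intro content estimated_parts _hdom
  unfold Spec_balance_splits balance_splits balance_splits_alt
  by_cases h2 : estimated_parts ≥ 2
  · simp only [if_pos h2, pvNlPositions_eq]
    have hstep : 0 ≤ PySem.Int.floordiv (content.toList.length : Int) estimated_parts := by
      rw [PySem.Int.floordiv_eq_ediv_of_pos (by omega)]
      exact Int.ediv_nonneg (by positivity) (by omega)
    have := loop_eq content.toList (PySem.Int.floordiv (content.toList.length : Int) estimated_parts)
      hstep (estimated_parts - 1).toNat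
    simp only at this
    rw [this.1]
  · have : (estimated_parts - 1).toNat = 0 := by omega
    simp [this]
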